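-- pv_equiv track=rewrite | github.com/isogenies-vdf/isogenies-vdf-sage | isogenies-vdf/strategy.py | generate
-- ===== SOURCE A (Python) =====
-- def generate(n, p, q):
--     '''
--     INPUT:
--     * n the height of the tree
--     * p the cost of one multiplication step
--     * q the cost of one isogeny step
--     OUTPUT:
--     * a list corresponding to a strategy
--     REMARK:
--     from Luca De Feo's answer on crypto.stackexchange.com
--     '''
--     S = { 1: [] }
--     C = { 1: 0 }
--     for i in range(2, n+1):
--         b, cost = min(((b, C[i-b] + C[b] + b*p + (i-b)*q) for b in range(1,i)), key=lambda t: t[1])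
--         S[i] = [b] + S[i-b] + S[b]
--         C[i] = cost
--     return S[n]
-- ===== SOURCE B (Python) =====
-- def generate(n, p, q):
--     # Same DP costs, but store only the optimal split point B[i] (first minimal b)
--     # and reconstruct the strategy list once at the end by recursive backtracking.
--     B = {}
--     C = {1: 0}
--     for i in range(2, n + 1):
--         b, cost = min(((b, C[i - b] + C[b] + b * p + (i - b) * q) for b in range(1, i)),
--                       key=lambda t: t[1])
--         B[i] = b
--         C[i] = cost
--
--     def build(i):
--         if i == 1:
--             return []
--         b = B[i]
--         return [b] + build(i - b) + build(b)
--
--     return build(n)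
-- ===== Notes on version B (the rewrite author's own statement) =====
-- stated objective: alternative
-- what changed: B keeps only the optimal split point B[i] and cost C[i] in the DP loop (no strategy lists), then reconstructs the answer once by a separate recursive backtracking function build(i) = [b] + build(i-b) + build(b).
import Mathlib
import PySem

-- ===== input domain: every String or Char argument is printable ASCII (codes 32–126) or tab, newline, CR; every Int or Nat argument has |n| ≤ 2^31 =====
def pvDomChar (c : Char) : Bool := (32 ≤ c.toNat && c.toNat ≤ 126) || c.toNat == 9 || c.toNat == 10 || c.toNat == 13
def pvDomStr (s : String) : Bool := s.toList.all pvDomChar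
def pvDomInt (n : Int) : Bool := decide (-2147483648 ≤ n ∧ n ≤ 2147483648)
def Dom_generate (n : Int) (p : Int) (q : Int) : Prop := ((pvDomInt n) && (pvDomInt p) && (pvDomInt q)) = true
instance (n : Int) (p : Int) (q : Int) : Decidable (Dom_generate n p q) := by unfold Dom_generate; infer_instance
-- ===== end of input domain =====

-- B stores only the optimal split point per level and reconstructs the strategy once by
-- recursive backtracking, instead of materialising every intermediate strategy list (objective: alternative).

-- ===== PORT A =====
-- the inner 'min((b, C[i-b]+C[b]+b*p+(i-b)*q) for b in range(1,i)), key=t[1])' — the identical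
-- expression appears verbatim in both Pythons, so both ports share this helper.
-- '.getD (0,0)': for every i the loop visits (i ≥ 2) range(1,i) is nonempty, so min? is some.
-- 'C.getD _ 0': keys 1..i-1 are always present in C, so the default is never consulted.
def minSplit (p q i : Int) (C : PySem.Dict Int Int) : Int × Int :=
  (PySem.List.min?
    ((PySem.List.pyRange 1 i 1).map
      (fun b => (b, C.getD (i - b) 0 + C.getD b 0 + b * p + (i - b) * q)))
    (fun t => t.2)).getD (0, 0)

-- loop body: S[i] = [b] + S[i-b] + S[b]; C[i] = cost  (S.getD: those keys are present for i ≥ 2)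
def genStepA (p q : Int) (st : PySem.Dict Int (List Int) × PySem.Dict Int Int) (i : Int) :
    PySem.Dict Int (List Int) × PySem.Dict Int Int :=
  let bc := minSplit p q i st.2
  (st.1.insert i ([bc.1] ++ st.1.getD (i - bc.1) [] ++ st.1.getD bc.1 []), st.2.insert i bc.2)

def generate (n : Int) (p : Int) (q : Int) : List Int :=
  let st := (PySem.List.pyRange 2 (n + 1) 1).foldl (genStepA p q)
      (PySem.Dict.ofList [((1 : Int), ([] : List Int))], PySem.Dict.ofList [((1 : Int), (0 : Int))])
  st.1.getD n []   -- S[n]; the key is present for n ≥ 1 (Pre_); Python raises KeyError otherwise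

-- ===== PORT B =====
-- loop body: B[i] = b; C[i] = cost
def genStepB (p q : Int) (st : PySem.Dict Int Int × PySem.Dict Int Int) (i : Int) :
    PySem.Dict Int Int × PySem.Dict Int Int :=
  let bc := minSplit p q i st.2
  (st.1.insert i bc.1, st.2.insert i bc.2)

-- build(i): if i == 1: []  else  [b] + build(i-b) + build(b), b = B[i].
-- fuel only makes the recursion structural; the call below supplies enough for every reachable input.
def build (B : PySem.Dict Int Int) : Nat → Int → List Int
  | 0, _ => []
  | fuel + 1, i =>
    if i == 1 then []
    else
      let b := B.getD i 0   -- B[i]; present for every i this recursion reaches inside Pre_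
      [b] ++ build B fuel (i - b) ++ build B fuel b

def generate_alt (n : Int) (p : Int) (q : Int) : List Int :=
  let st := (PySem.List.pyRange 2 (n + 1) 1).foldl (genStepB p q)
      (PySem.Dict.empty, PySem.Dict.ofList [((1 : Int), (0 : Int))])
  build st.1 n.toNat n

-- ===== PRECONDITION & SPEC =====
-- Pre_: exactly the inputs on which the Python A returns (for n ≤ 0 the final S[n] raises KeyError).
def Pre_generate (n : Int) (p : Int) (q : Int) : Prop := 1 ≤ n
instance (n : Int) (p : Int) (q : Int) : Decidable (Pre_generate n p q) := by unfold Pre_generate; infer_instance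
def pvWitness_generate : Int × Int × Int := (4, 2, 1)

def Spec_generate (n : Int) (p : Int) (q : Int) (out : List Int) : Prop := out = generate_alt n p q
instance (n : Int) (p : Int) (q : Int) (out : List Int) : Decidable (Spec_generate n p q out) := by unfold Spec_generate; infer_instance

-- ===== CLAIM (what is proved, stated in full; the proofs are below) =====
def Claim_equal_generate : Prop := ∀ (n : Int) (p : Int) (q : Int), Dom_generate n p q → Pre_generate n p q → Spec_generate n p q (generate n p q)

-- ===== LEMMAS AND PROOFS =====

def loopA (p q : Int) (k : Nat) : PySem.Dict Int (List Int) × PySem.Dict Int Int :=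
  (PySem.List.pyRange 2 (2 + (k : Int)) 1).foldl (genStepA p q)
      (PySem.Dict.ofList [((1 : Int), ([] : List Int))], PySem.Dict.ofList [((1 : Int), (0 : Int))])

def loopB (p q : Int) (k : Nat) : PySem.Dict Int Int × PySem.Dict Int Int :=
  (PySem.List.pyRange 2 (2 + (k : Int)) 1).foldl (genStepB p q)
      (PySem.Dict.empty, PySem.Dict.ofList [((1 : Int), (0 : Int))])

theorem loopA_succ (p q : Int) (k : Nat) :
    loopA p q (k + 1) = genStepA p q (loopA p q k) (2 + (k : Int)) := by
  unfold loopA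
  push_cast
  rw [show (2 + ((k : Int) + 1)) = (2 + (k : Int)) + 1 by ring,
      PySem.List.pyRange_one_succ_right (by omega), List.foldl_append]
  simp

theorem loopB_succ (p q : Int) (k : Nat) :
    loopB p q (k + 1) = genStepB p q (loopB p q k) (2 + (k : Int)) := by
  unfold loopB
  push_cast
  rw [show (2 + ((k : Int) + 1)) = (2 + (k : Int)) + 1 by ring,
      PySem.List.pyRange_one_succ_right (by omega), List.foldl_append]
  simp

-- the chosen split point lies in range(1, i)
theorem minSplit_mem (p q i : Int) (C : PySem.Dict Int Int) (hi : 2 ≤ i) :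
    1 ≤ (minSplit p q i C).1 ∧ (minSplit p q i C).1 < i := by
  unfold minSplit
  set l := (PySem.List.pyRange 1 i 1).map
      (fun b => (b, C.getD (i - b) 0 + C.getD b 0 + b * p + (i - b) * q)) with hl
  have hne : l ≠ [] := by
    simp [hl, PySem.List.pyRange_one_cons (show (1:Int) < i by omega)]
  rcases hm : PySem.List.min? l (fun t => t.2) with _ | m
  · exact absurd ((PySem.List.min?_eq_none_iff l _).mp hm) hne
  have hmem := PySem.List.min?_mem hm
  simp only [hl, List.mem_map] at hmem
  rcases hmem with ⟨b, hb, rfl⟩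
  have := PySem.List.mem_pyRange_one.mp hb
  simpa using this

-- inserting a key above i does not change build at i (given the split-point invariant below K)
theorem build_insert (B : PySem.Dict Int Int) (K v : Int)
    (hinv : ∀ j : Int, 2 ≤ j → j < K → 1 ≤ B.getD j 0 ∧ B.getD j 0 < j) :
    ∀ (fuel : Nat) (i : Int), 1 ≤ i → i < K →
      build (B.insert K v) fuel i = build B fuel i := by
  intro fuel
  induction fuel with
  | zero => intro i _ _; rfl
  | succ f ih =>
    intro i h1 hiK
    by_cases hi1 : i = 1
    · simp [build, hi1]
    · have hi2 : 2 ≤ i := by omega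
      have hne : (i == 1) = false := by simp [hi1]
      have hget : (B.insert K v).getD i 0 = B.getD i 0 :=
        PySem.Dict.getD_insert_of_ne _ _ _ (by omega)
      obtain ⟨hb1, hb2⟩ := hinv i hi2 hiK
      simp only [build, hne, Bool.false_eq_true, if_false, hget]
      rw [ih (i - B.getD i 0) (by omega) (by omega), ih (B.getD i 0) (by omega) (by omega)]

theorem master (p q : Int) (k : Nat) :
    (loopA p q k).2 = (loopB p q k).2
    ∧ (∀ j : Int, 2 ≤ j → j ≤ 1 + (k : Int) →
        1 ≤ (loopB p q k).1.getD j 0 ∧ (loopB p q k).1.getD j 0 < j)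
    ∧ (∀ j : Int, 1 ≤ j → j ≤ 1 + (k : Int) → ∀ fuel : Nat, (j - 1).toNat ≤ fuel →
        (loopA p q k).1.getD j [] = build (loopB p q k).1 fuel j) := by
  induction k with
  | zero =>
    refine ⟨?_, ?_, ?_⟩
    · simp [loopA, loopB, PySem.List.pyRange_one_eq_nil (by omega : (2:Int) ≤ 2)]
    · intro j h2 h1; omega
    · intro j h1 h2 fuel _
      have hj : j = 1 := by omega
      subst hj
      cases fuel with
      | zero =>
        simp only [loopA, loopB, PySem.List.pyRange_one_eq_nil (by omega : (2:Int) ≤ 2),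
          List.foldl_nil, build]
        rfl
      | succ f =>
        simp only [loopA, loopB, PySem.List.pyRange_one_eq_nil (by omega : (2:Int) ≤ 2),
          List.foldl_nil, build]
        rfl
  | succ k ih =>
    obtain ⟨ihC, ihB, ihS⟩ := ih
    set i : Int := 2 + (k : Int) with hidef
    have hi2 : 2 ≤ i := by omega
    set C := (loopA p q k).2 with hC
    set S := (loopA p q k).1 with hS
    set B := (loopB p q k).1 with hB
    have hCB : (loopB p q k).2 = C := ihC.symm
    set b : Int := (minSplit p q i C).1 with hb
    obtain ⟨hb1, hb2⟩ := minSplit_mem p q i C hi2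
    have hA1 : (loopA p q (k + 1)).1 = S.insert i ([b] ++ S.getD (i - b) [] ++ S.getD b []) := by
      rw [loopA_succ]; rfl
    have hA2 : (loopA p q (k + 1)).2 = C.insert i (minSplit p q i C).2 := by
      rw [loopA_succ]; rfl
    have hB1 : (loopB p q (k + 1)).1 = B.insert i b := by
      rw [loopB_succ]; simp only [genStepB, hCB]; rfl
    have hB2 : (loopB p q (k + 1)).2 = C.insert i (minSplit p q i C).2 := by
      rw [loopB_succ]; simp only [genStepB, hCB]; rfl
    refine ⟨?_, ?_, ?_⟩
    · rw [hA2, hB2]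
    · intro j h2 h1
      rw [hB1, PySem.Dict.getD_insert]
      split_ifs with hji
      · constructor <;> omega
      · exact ihB j h2 (by omega)
    · intro j h1 h2 fuel hfuel
      rw [hA1, hB1]
      by_cases hji : j = i
      · subst hji
        have hf1 : 1 ≤ (i - 1).toNat := by omega
        obtain ⟨f, rfl⟩ : ∃ f, fuel = f + 1 := ⟨fuel - 1, by omega⟩
        have hne : (i == 1) = false := by simp; omega
        have hgi : (B.insert i b).getD i 0 = b := PySem.Dict.getD_insert_self _ _ _ _
        simp only [build, hne, Bool.false_eq_true, if_false, hgi]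
        rw [build_insert B i b (fun j hj2 hji => ihB j hj2 (by omega)) f (i - b) (by omega) (by omega),
            build_insert B i b (fun j hj2 hji => ihB j hj2 (by omega)) f b (by omega) (by omega),
            ← ihS (i - b) (by omega) (by omega) f (by omega),
            ← ihS b (by omega) (by omega) f (by omega),
            PySem.Dict.getD_insert_self]
      · have hjlt : j < i := by omega
        rw [PySem.Dict.getD_insert_of_ne _ _ _ (by omega),
            build_insert B i b (fun j hj2 hji => ihB j hj2 (by omega)) fuel j h1 hjlt]
        exact ihS j h1 (by omega) fuel hfuel

-- ===== VERDICT (by name: the statement is the Claim_ definition above) =====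
theorem generate_spec : Claim_equal_generate := by
  intro n p q _ hpre
  unfold Spec_generate generate generate_alt Pre_generate at *
  have hk : n + 1 = 2 + ((n - 1).toNat : Int) := by omega
  have ⟨_, _, h⟩ := master p q (n - 1).toNat
  simp only [loopA, loopB, ← hk] at h
  exact h n hpre (by omega) n.toNat (by omega)
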